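-- pv_equiv track=rewrite | github.com/amelia-chin/lame | app/helpers.py | a_remove
-- ===== SOURCE A (Python) =====
-- def a_remove(string: str) -> str:
--     output = ""
--     skip_next = False
--     for char in string:
--         if skip_next:
--             skip_next = not skip_next
--             continue
--         if char == "'":
--             skip_next = True
--         output += char
--     return output
-- ===== SOURCE B (Python) =====
-- import re
--
-- def a_remove(string: str) -> str:
--     return re.sub(r"'.", "'", string, flags=re.DOTALL)
-- ===== Notes on version B (the rewrite author's own statement) =====
-- stated objective: idiomatic
-- what changed: Replaced the per-character loop with a skip flag by a single regex substitution (apostrophe-plus-any-char, DOTALL, replaced by a lone apostrophe), whose non-overlapping left-to-right matching removes exactly the character after each apostrophe.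
import Mathlib
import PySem

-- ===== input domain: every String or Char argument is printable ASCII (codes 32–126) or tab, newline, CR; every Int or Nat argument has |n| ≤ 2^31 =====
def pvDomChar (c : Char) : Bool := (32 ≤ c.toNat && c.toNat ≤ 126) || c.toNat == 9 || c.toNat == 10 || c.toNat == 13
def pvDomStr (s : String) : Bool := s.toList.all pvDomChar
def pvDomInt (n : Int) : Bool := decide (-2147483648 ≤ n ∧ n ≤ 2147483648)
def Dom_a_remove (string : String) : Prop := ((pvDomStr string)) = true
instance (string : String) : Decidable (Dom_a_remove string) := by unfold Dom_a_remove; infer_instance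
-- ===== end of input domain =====

-- B replaces A's per-character loop with a skip flag by one regex substitution re.sub(r"'.", "'", …, DOTALL) (idiomatic).

-- ===== PORT A =====
-- the loop body: state = (output so far, skip_next flag); 'output += char' is list append
def aRemoveStep (st : List Char × Bool) (c : Char) : List Char × Bool :=
  if st.2 then (st.1, false)
  else if c = '\'' then (st.1 ++ [c], true)
  else (st.1 ++ [c], false)

def a_remove (string : String) : String :=
  String.mk (string.toList.foldl aRemoveStep ([], false)).1

-- ===== PORT B =====
-- the regex engine's non-overlapping left-to-right scan for "'." replacing with "'":
-- at an apostrophe followed by any character, emit the apostrophe and resume after the pair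
def regexSub (l : List Char) : List Char :=
  match l with
  | [] => []
  | [c] => [c]
  | c :: d :: cs => if c = '\'' then c :: regexSub cs else c :: regexSub (d :: cs)

def a_remove_alt (string : String) : String :=
  String.mk (regexSub string.toList)

-- ===== PRECONDITION & SPEC =====
def Spec_a_remove (string : String) (out : String) : Prop := out = a_remove_alt string
instance (string : String) (out : String) : Decidable (Spec_a_remove string out) := by unfold Spec_a_remove; infer_instance

-- ===== CLAIM (what is proved, stated in full; the proofs are below) =====
def Claim_equal_a_remove : Prop := ∀ (string : String), Dom_a_remove string → Spec_a_remove string (a_remove string)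

-- ===== LEMMAS AND PROOFS =====
theorem foldl_aRemoveStep_eq (l : List Char) :
    ∀ out, (l.foldl aRemoveStep (out, false)).1 = out ++ regexSub l := by
  induction l using regexSub.induct with
  | case1 => intro out; simp [regexSub]
  | case2 c =>
      intro out
      by_cases h : c = '\'' <;> simp [regexSub, aRemoveStep, h]
  | case3 c cs ih =>
      intro out
      simp [List.foldl, aRemoveStep, regexSub, ih]
  | case4 c d cs h ih =>
      intro out
      have hstep : aRemoveStep (out, false) c = (out ++ [c], false) := by
        simp [aRemoveStep, h]
      rw [List.foldl_cons, hstep, ih]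
      simp [regexSub, h]

-- ===== VERDICT (by name: the statement is the Claim_ definition above) =====
theorem a_remove_spec : Claim_equal_a_remove := by
  intro s _
  unfold Spec_a_remove a_remove a_remove_alt
  rw [foldl_aRemoveStep_eq]
  simp
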